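-- pv_equiv track=rewrite | github.com/wbird0606/BirdEye-SQL | birdeye/runner.py | _rewrite_qmark_sql
-- ===== SOURCE A (Python) =====
-- def _rewrite_qmark_sql(sql: str):
--     """
--     將 SQL 中的 ? 位置參數（排除字串/註解內）改寫為 @P1, @P2 ...。
--     回傳 (rewritten_sql, qmark_count)。
--     """
--     out = []
--     i = 0
--     p_idx = 0
--     n = len(sql)
--     in_string = False
--     in_line_comment = False
--     in_block_comment = False
--
--     while i < n:
--         ch = sql[i]
--         nx = sql[i + 1] if i + 1 < n else ""
--
--         if in_line_comment:
--             out.append(ch)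
--             if ch == "\n":
--                 in_line_comment = False
--             i += 1
--             continue
--
--         if in_block_comment:
--             out.append(ch)
--             if ch == "*" and nx == "/":
--                 out.append(nx)
--                 i += 2
--                 in_block_comment = False
--             else:
--                 i += 1
--             continue
--
--         if in_string:
--             out.append(ch)
--             if ch == "'":
--                 # T-SQL 單引號跳脫: ''
--                 if nx == "'":
--                     out.append(nx)
--                     i += 2
--                     continue
--                 in_string = False
--             i += 1
--             continue
--
--         if ch == "-" and nx == "-":
--             out.append(ch)
--             out.append(nx)
--             i += 2
--             in_line_comment = True
--             continue
--
--         if ch == "/" and nx == "*":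
--             out.append(ch)
--             out.append(nx)
--             i += 2
--             in_block_comment = True
--             continue
--
--         if ch == "'":
--             out.append(ch)
--             i += 1
--             in_string = True
--             continue
--
--         if ch == "?":
--             p_idx += 1
--             out.append(f"@P{p_idx}")
--             i += 1
--             continue
--
--         out.append(ch)
--         i += 1
--
--     return "".join(out), p_idx
-- ===== SOURCE B (Python) =====
-- # B: token-based scanner -- consumes whole string-literal / comment tokens with
-- # helper scanners and a single counter, instead of A's per-character state-flag machine.
--
-- def _scan_string(sql, i):
--     # sql[i-1] was the opening quote; return end index just past the literal
--     n = len(sql)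
--     while i < n:
--         if sql[i] == "'":
--             if i + 1 < n and sql[i + 1] == "'":
--                 i += 2          # '' escape: stay inside the literal
--             else:
--                 return i + 1    # closing quote
--         else:
--             i += 1
--     return n                    # unterminated literal runs to EOF
--
--
-- def _scan_line_comment(sql, i):
--     # return end index just past the terminating newline (or EOF)
--     n = len(sql)
--     while i < n:
--         if sql[i] == "\n":
--             return i + 1
--         i += 1
--     return n
--
--
-- def _scan_block_comment(sql, i):
--     # return end index just past the closing */ (or EOF)
--     n = len(sql)
--     while i < n:
--         if sql[i] == "*" and i + 1 < n and sql[i + 1] == "/":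
--             return i + 2
--         i += 1
--     return n
--
--
-- def _rewrite_qmark_sql(sql: str):
--     out = []
--     i = 0
--     cnt = 0
--     n = len(sql)
--     while i < n:
--         ch = sql[i]
--         if ch == "'":
--             j = _scan_string(sql, i + 1)
--             out.append(sql[i:j])
--             i = j
--         elif ch == "-" and i + 1 < n and sql[i + 1] == "-":
--             j = _scan_line_comment(sql, i + 2)
--             out.append(sql[i:j])
--             i = j
--         elif ch == "/" and i + 1 < n and sql[i + 1] == "*":
--             j = _scan_block_comment(sql, i + 2)
--             out.append(sql[i:j])
--             i = j
--         elif ch == "?":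
--             cnt += 1
--             out.append(f"@P{cnt}")
--             i += 1
--         else:
--             out.append(ch)
--             i += 1
--     return "".join(out), cnt
-- ===== Notes on version B (the rewrite author's own statement) =====
-- stated objective: alternative
-- what changed: Replaces A's per-character scan driven by three boolean state flags (in_string/in_line_comment/in_block_comment) with a token-based scanner: helper scanners consume a whole string literal, line comment or block comment in one step, and the driver only dispatches on the leading character(s) and rewrites bare ? placeholders.
import Mathlib
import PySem

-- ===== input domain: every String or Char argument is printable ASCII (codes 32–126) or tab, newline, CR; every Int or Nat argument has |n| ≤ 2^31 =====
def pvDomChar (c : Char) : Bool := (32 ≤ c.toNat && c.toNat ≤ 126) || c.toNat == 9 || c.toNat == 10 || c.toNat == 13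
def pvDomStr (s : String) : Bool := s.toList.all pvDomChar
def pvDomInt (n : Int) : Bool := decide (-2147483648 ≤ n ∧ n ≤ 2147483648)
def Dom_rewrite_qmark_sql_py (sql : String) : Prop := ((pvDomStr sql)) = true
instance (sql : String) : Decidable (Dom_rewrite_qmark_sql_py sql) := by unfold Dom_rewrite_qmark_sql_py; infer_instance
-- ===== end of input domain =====

-- B replaces A's per-character scan with three boolean state flags by a token-based
-- scanner that consumes whole string-literal / comment tokens with helper scanners
-- (objective: alternative decomposition, same cost). Equal return value proved below.

-- ===== PORT A =====
-- A's while-loop, one step per character; state = (p_idx, in_string, in_line_comment,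
-- in_block_comment); the pattern `c :: nx :: rest2` is Python's ch/nx pair (nx = ""
-- becomes the one-element pattern), and `i += 2` consumes both.
def pvGoA (cs : List Char) (p : Int) (instr inlc inbc : Bool) : List Char × Int :=
  match cs with
  | [] => ([], p)
  | [c] =>
    if inlc then ([c], p)
    else if inbc then ([c], p)
    else if instr then ([c], p)
    else if c = '\'' then ([c], p)
    else if c = '?' then ('@' :: 'P' :: (PySem.Int.toStr (p + 1)).toList, p + 1)
    else ([c], p)
  | c :: nx :: rest2 =>
    if inlc then
      (c :: (pvGoA (nx :: rest2) p instr (if c = '\n' then false else inlc) inbc).1, (pvGoA (nx :: rest2) p instr (if c = '\n' then false else inlc) inbc).2)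
    else if inbc then
      if c = '*' ∧ nx = '/' then
        (c :: nx :: (pvGoA rest2 p instr inlc false).1, (pvGoA rest2 p instr inlc false).2)
      else
        (c :: (pvGoA (nx :: rest2) p instr inlc inbc).1, (pvGoA (nx :: rest2) p instr inlc inbc).2)
    else if instr then
      if c = '\'' then
        if nx = '\'' then
          (c :: nx :: (pvGoA rest2 p instr inlc inbc).1, (pvGoA rest2 p instr inlc inbc).2)
        else
          (c :: (pvGoA (nx :: rest2) p false inlc inbc).1, (pvGoA (nx :: rest2) p false inlc inbc).2)
      else
        (c :: (pvGoA (nx :: rest2) p instr inlc inbc).1, (pvGoA (nx :: rest2) p instr inlc inbc).2)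
    else if c = '-' ∧ nx = '-' then
      (c :: nx :: (pvGoA rest2 p instr true inbc).1, (pvGoA rest2 p instr true inbc).2)
    else if c = '/' ∧ nx = '*' then
      (c :: nx :: (pvGoA rest2 p instr inlc true).1, (pvGoA rest2 p instr inlc true).2)
    else if c = '\'' then
      (c :: (pvGoA (nx :: rest2) p true inlc inbc).1, (pvGoA (nx :: rest2) p true inlc inbc).2)
    else if c = '?' then
      (('@' :: 'P' :: (PySem.Int.toStr (p + 1)).toList) ++ (pvGoA (nx :: rest2) (p + 1) instr inlc inbc).1, (pvGoA (nx :: rest2) (p + 1) instr inlc inbc).2)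
    else
      (c :: (pvGoA (nx :: rest2) p instr inlc inbc).1, (pvGoA (nx :: rest2) p instr inlc inbc).2)
  termination_by cs.length
  decreasing_by all_goals (simp; try omega)

def rewrite_qmark_sql_py (sql : String) : String × Int :=
  (String.ofList (pvGoA sql.toList 0 false false false).1, (pvGoA sql.toList 0 false false false).2)

-- ===== PORT B =====
-- B's helper scanners each consume one whole token: they return
-- (consumed characters, remaining input) — Python's (sql[i:j], index j).
def pvScanStr (cs : List Char) : List Char × List Char :=
  match cs with
  | [] => ([], [])
  | [c] => if c = '\'' then ([c], []) else ([c], [])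
  | c :: c2 :: rest2 =>
    if c = '\'' then
      if c2 = '\'' then
        (c :: c2 :: (pvScanStr rest2).1, (pvScanStr rest2).2)
      else ([c], c2 :: rest2)
    else
      (c :: (pvScanStr (c2 :: rest2)).1, (pvScanStr (c2 :: rest2)).2)
  termination_by cs.length
  decreasing_by all_goals (simp; try omega)

def pvScanLine (cs : List Char) : List Char × List Char :=
  match cs with
  | [] => ([], [])
  | c :: rest =>
    if c = '\n' then ([c], rest)
    else
      (c :: (pvScanLine rest).1, (pvScanLine rest).2)

def pvScanBlock (cs : List Char) : List Char × List Char :=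
  match cs with
  | [] => ([], [])
  | [c] => ([c], [])
  | c :: c2 :: rest2 =>
    if c = '*' ∧ c2 = '/' then ([c, c2], rest2)
    else
      (c :: (pvScanBlock (c2 :: rest2)).1, (pvScanBlock (c2 :: rest2)).2)

theorem pvScanStr_len (cs : List Char) : (pvScanStr cs).2.length ≤ cs.length := by
  fun_induction pvScanStr cs <;> simp_all <;> omega

theorem pvScanLine_len (cs : List Char) : (pvScanLine cs).2.length ≤ cs.length := by
  fun_induction pvScanLine cs <;> simp_all <;> omega

theorem pvScanBlock_len (cs : List Char) : (pvScanBlock cs).2.length ≤ cs.length := by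
  fun_induction pvScanBlock cs <;> simp_all <;> omega

-- B's driver: dispatch on the leading character(s), consume a whole token, recurse.
def pvGoB (cs : List Char) (cnt : Int) : List Char × Int :=
  match cs with
  | [] => ([], cnt)
  | [c] =>
    if c = '\'' then ([c], cnt)
    else if c = '?' then ('@' :: 'P' :: (PySem.Int.toStr (cnt + 1)).toList, cnt + 1)
    else ([c], cnt)
  | c :: nx :: rest2 =>
    if c = '\'' then
      let t := pvScanStr (nx :: rest2)
      (c :: (t.1 ++ (pvGoB t.2 cnt).1), (pvGoB t.2 cnt).2)
    else if c = '-' ∧ nx = '-' then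
      let t := pvScanLine rest2
      (c :: nx :: (t.1 ++ (pvGoB t.2 cnt).1), (pvGoB t.2 cnt).2)
    else if c = '/' ∧ nx = '*' then
      let t := pvScanBlock rest2
      (c :: nx :: (t.1 ++ (pvGoB t.2 cnt).1), (pvGoB t.2 cnt).2)
    else if c = '?' then
      (('@' :: 'P' :: (PySem.Int.toStr (cnt + 1)).toList) ++ (pvGoB (nx :: rest2) (cnt + 1)).1, (pvGoB (nx :: rest2) (cnt + 1)).2)
    else
      (c :: (pvGoB (nx :: rest2) cnt).1, (pvGoB (nx :: rest2) cnt).2)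
  termination_by cs.length
  decreasing_by
  · have := pvScanStr_len (nx :: rest2); simp at this ⊢; omega
  · have := pvScanLine_len rest2; simp; omega
  · have := pvScanBlock_len rest2; simp; omega
  · simp
  · simp

def rewrite_qmark_sql_py_alt (sql : String) : String × Int :=
  (String.ofList (pvGoB sql.toList 0).1, (pvGoB sql.toList 0).2)

-- ===== PRECONDITION & SPEC =====
def Spec_rewrite_qmark_sql_py (sql : String) (out : String × Int) : Prop := out = rewrite_qmark_sql_py_alt sql
instance (sql : String) (out : String × Int) : Decidable (Spec_rewrite_qmark_sql_py sql out) := by unfold Spec_rewrite_qmark_sql_py; infer_instance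

-- ===== CLAIM (what is proved, stated in full; the proofs are below) =====
def Claim_equal_rewrite_qmark_sql_py : Prop := ∀ (sql : String), Dom_rewrite_qmark_sql_py sql → Spec_rewrite_qmark_sql_py sql (rewrite_qmark_sql_py sql)

-- ===== LEMMAS AND PROOFS =====

theorem pvStrA (cs : List Char) (p : Int) :
    pvGoA cs p true false false =
      ((pvScanStr cs).1 ++ (pvGoA (pvScanStr cs).2 p false false false).1,
       (pvGoA (pvScanStr cs).2 p false false false).2) := by
  match cs with
  | [] => simp [pvGoA, pvScanStr]
  | [c] => by_cases hc : c = '\'' <;> simp [pvGoA, pvScanStr, hc]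
  | c :: nx :: rest2 =>
    by_cases hc : c = '\''
    · by_cases hn : nx = '\''
      · have ih := pvStrA rest2 p
        simp [pvGoA, pvScanStr, hc, hn, ih]
      · simp [pvGoA, pvScanStr, hc, hn]
    · have ih := pvStrA (nx :: rest2) p
      simp [pvGoA, pvScanStr, hc, ih]
  termination_by cs.length
  decreasing_by all_goals (simp; try omega)

theorem pvLineA (cs : List Char) (p : Int) :
    pvGoA cs p false true false =
      ((pvScanLine cs).1 ++ (pvGoA (pvScanLine cs).2 p false false false).1,
       (pvGoA (pvScanLine cs).2 p false false false).2) := by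
  match cs with
  | [] => simp [pvGoA, pvScanLine]
  | [c] => by_cases hc : c = '\n' <;> simp [pvGoA, pvScanLine, hc]
  | c :: nx :: rest2 =>
    by_cases hc : c = '\n'
    · simp [pvGoA, pvScanLine, hc]
    · have ih := pvLineA (nx :: rest2) p
      simp [pvGoA, pvScanLine, hc, ih]
  termination_by cs.length

theorem pvBlockA (cs : List Char) (p : Int) :
    pvGoA cs p false false true =
      ((pvScanBlock cs).1 ++ (pvGoA (pvScanBlock cs).2 p false false false).1,
       (pvGoA (pvScanBlock cs).2 p false false false).2) := by
  match cs with
  | [] => simp [pvGoA, pvScanBlock]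
  | [c] => simp [pvGoA, pvScanBlock]
  | c :: nx :: rest2 =>
    by_cases h : c = '*' ∧ nx = '/'
    · simp [pvGoA, pvScanBlock, h]
    · have ih := pvBlockA (nx :: rest2) p
      simp [pvGoA, pvScanBlock, h, ih]
  termination_by cs.length

theorem pvMain (cs : List Char) (p : Int) :
    pvGoA cs p false false false = pvGoB cs p := by
  match cs with
  | [] => simp [pvGoA, pvGoB]
  | [c] => simp [pvGoA, pvGoB]
  | c :: nx :: rest2 =>
    by_cases hq : c = '\''
    · have hs := pvStrA (nx :: rest2) p
      have ih := pvMain (pvScanStr (nx :: rest2)).2 p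
      simp [pvGoA, pvGoB, hq, hs, ih]
    · by_cases hl : c = '-' ∧ nx = '-'
      · have hL := pvLineA rest2 p
        have ih := pvMain (pvScanLine rest2).2 p
        simp [pvGoA, pvGoB, hl, hL, ih]
      · by_cases hb : c = '/' ∧ nx = '*'
        · have hB := pvBlockA rest2 p
          have ih := pvMain (pvScanBlock rest2).2 p
          simp [pvGoA, pvGoB, hb, hB, ih]
        · by_cases hQ : c = '?'
          · have ih := pvMain (nx :: rest2) (p + 1)
            simp [pvGoA, pvGoB, hQ, ih]
          · have ih := pvMain (nx :: rest2) p
            simp [pvGoA, pvGoB, hq, hl, hb, hQ, ih]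
  termination_by cs.length
  decreasing_by
  · have := pvScanStr_len (nx :: rest2); simp at this ⊢; omega
  · have := pvScanLine_len rest2; simp; omega
  · have := pvScanBlock_len rest2; simp; omega
  · simp
  · simp

-- ===== VERDICT (by name: the statement is the Claim_ definition above) =====
theorem rewrite_qmark_sql_py_spec : Claim_equal_rewrite_qmark_sql_py := by
  intro sql _
  unfold Spec_rewrite_qmark_sql_py rewrite_qmark_sql_py rewrite_qmark_sql_py_alt
  simp [pvMain]
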